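-- pv_equiv track=rewrite | github.com/HCui1994/Surrender-to-Reality | Amazon/vo/new_password.py | new_password
-- ===== SOURCE A (Python) =====
-- def new_password(password, mapping):
--     res = []
--     password_to_list = list(password)
--
--     def recur(new_password, i):
--         if i == len(password):
--             if new_password == password:
--                 return
--             res.append(new_password)
--             return
--         recur(new_password + password_to_list[i], i + 1)  # no replacement
--         if password_to_list[i] in mapping.keys():
--             for c in mapping[password_to_list[i]]:
--                 # replacement
--                 recur(new_password + c, i + 1)
--
--     recur("", 0)
--     return res
-- ===== SOURCE B (Python) =====
-- def new_password(password, mapping):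
--     # Level-wise (breadth-first) expansion instead of DFS recursion:
--     # build all prefixes position by position, then drop the original.
--     prefixes = [""]
--     for c in password:
--         opts = [c] + list(mapping[c]) if c in mapping else [c]
--         prefixes = [p + o for p in prefixes for o in opts]
--     return [s for s in prefixes if s != password]
-- ===== Notes on version B (the rewrite author's own statement) =====
-- stated objective: faster
-- what changed: Replaced the recursive DFS with res-list mutation by an iterative level-wise product: prefixes are extended position by position with each character's choice list, then the original password is filtered out (same enumeration order).
import Mathlib
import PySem

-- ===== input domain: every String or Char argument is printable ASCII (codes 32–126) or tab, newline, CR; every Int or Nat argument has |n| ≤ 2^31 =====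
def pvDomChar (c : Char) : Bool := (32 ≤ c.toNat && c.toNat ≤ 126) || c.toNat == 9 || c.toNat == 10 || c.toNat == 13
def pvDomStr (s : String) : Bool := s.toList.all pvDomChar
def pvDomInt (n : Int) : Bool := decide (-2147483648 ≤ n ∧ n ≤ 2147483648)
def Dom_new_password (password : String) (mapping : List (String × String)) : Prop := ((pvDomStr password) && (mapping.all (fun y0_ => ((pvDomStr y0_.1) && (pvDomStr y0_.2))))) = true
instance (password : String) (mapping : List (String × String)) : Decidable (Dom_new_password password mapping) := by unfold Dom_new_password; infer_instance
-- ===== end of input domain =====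

-- ===== PORT A =====
-- B changes structure only (iterative level-wise product vs recursive DFS); same values.
-- literal port of A's inner `recur`: rest = password[i:], acc = new_password;
-- the mutable `res` becomes the returned (concatenated) list, in the same DFS order.
def npRecurA (password : String) (mapping : List (String × String))
    (acc : String) (rest : List Char) : List String :=
  match rest with
  | [] => if acc = password then [] else [acc]
  | c :: rest' =>
      npRecurA password mapping (acc ++ c.toString) rest' ++
      (match (PySem.Dict.mk mapping).get? c.toString with
       | some v => v.toList.flatMap (fun r => npRecurA password mapping (acc ++ r.toString) rest')
       | none => [])

def new_password (password : String) (mapping : List (String × String)) : List String :=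
  npRecurA password mapping "" password.toList

-- ===== PORT B =====
def new_password_alt (password : String) (mapping : List (String × String)) : List String :=
  (password.toList.foldl
    (fun (ps : List String) (c : Char) =>
      let opts : List Char :=
        match (PySem.Dict.mk mapping).get? c.toString with
        | some v => c :: v.toList
        | none => [c]
      ps.flatMap (fun p => opts.map (fun o => p ++ o.toString)))
    [""]).filter (fun s => s ≠ password)
-- ===== PRECONDITION & SPEC =====
def Spec_new_password (password : String) (mapping : List (String × String)) (out : List String) : Prop := out = new_password_alt password mapping
instance (password : String) (mapping : List (String × String)) (out : List String) : Decidable (Spec_new_password password mapping out) := by unfold Spec_new_password; infer_instance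

-- ===== CLAIM (what is proved, stated in full; the proofs are below) =====
def Claim_equal_new_password : Prop := ∀ (password : String) (mapping : List (String × String)), Dom_new_password password mapping → Spec_new_password password mapping (new_password password mapping)


-- ===== LEMMAS AND PROOFS =====

-- proof-only helpers
def npOpts (mapping : List (String × String)) (c : Char) : List Char :=
  match (PySem.Dict.mk mapping).get? c.toString with
  | some v => c :: v.toList
  | none => [c]

def npExt (mapping : List (String × String)) (acc : String) : List Char → List String
  | [] => [acc]
  | c :: r => (npOpts mapping c).flatMap (fun o => npExt mapping (acc ++ o.toString) r)

theorem npRecurA_eq (password : String) (mapping : List (String × String))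
    (rest : List Char) (acc : String) :
    npRecurA password mapping acc rest
      = (npExt mapping acc rest).filter (fun s => s ≠ password) := by
  induction rest generalizing acc with
  | nil =>
      simp [npRecurA, npExt, List.filter]
      split_ifs with h <;> simp [h]
  | cons c r ih =>
      cases h : (PySem.Dict.mk mapping).get? (String.singleton c) with
      | none => simp [npRecurA, npExt, npOpts, h, ih]
      | some v => simp [npRecurA, npExt, npOpts, h, ih, List.filter_flatMap]

theorem npFoldl_eq (mapping : List (String × String))
    (rest : List Char) (ps : List String) :
    rest.foldl
      (fun (ps : List String) (c : Char) =>
        let opts : List Char :=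
          match (PySem.Dict.mk mapping).get? c.toString with
          | some v => c :: v.toList
          | none => [c]
        ps.flatMap (fun p => opts.map (fun o => p ++ o.toString)))
      ps
      = ps.flatMap (fun p => npExt mapping p rest) := by
  induction rest generalizing ps with
  | nil => simp [npExt]
  | cons c r ih =>
      simp only [List.foldl_cons, ih, npExt, npOpts, List.flatMap_assoc, List.flatMap_map]

-- ===== VERDICT (by name: the statement is the Claim_ definition above) =====
theorem new_password_spec : Claim_equal_new_password := by
  intro password mapping _
  unfold Spec_new_password new_password new_password_alt
  rw [npFoldl_eq, npRecurA_eq]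
  simp
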